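-- pv_equiv track=rewrite | github.com/MichealAbaho/sustainable_develoment_goals_un | data_preprocess.py | label_encod
-- ===== SOURCE A (Python) =====
-- from collections import Counter
--
-- def label_encod(elem):
--     unique_series = list(Counter(elem).keys())
--     unique_series = [str(i) for i in unique_series]
--     encoded_list = []
--     for unique_serie in unique_series:
--         duplicate_series = [i for i in elem if i == unique_serie]
--         duplicate_series_transformed = [str(i) + '__' + str(j) for j, i in enumerate(duplicate_series)]
--         for i in duplicate_series_transformed:
--             encoded_list.append(i)
--         duplicate_series.clear()
--     return encoded_list
-- ===== SOURCE B (Python) =====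
-- def label_encod(elem):
--     # One pass builds an occurrence counter; then emit each first-appearance
--     # distinct value with suffixes 0..count-1 -- no per-value rescan of elem.
--     counts = {}
--     for x in elem:
--         counts[x] = counts.get(x, 0) + 1
--     return [str(v) + '__' + str(j) for v in counts for j in range(counts[v])]
-- ===== Notes on version B (the rewrite author's own statement) =====
-- stated objective: faster
-- what changed: B replaces A's per-unique-value full rescan of elem (Counter keys, then a filter pass per key) with a single counting pass plus range(count) emission per distinct value.
import Mathlib
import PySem

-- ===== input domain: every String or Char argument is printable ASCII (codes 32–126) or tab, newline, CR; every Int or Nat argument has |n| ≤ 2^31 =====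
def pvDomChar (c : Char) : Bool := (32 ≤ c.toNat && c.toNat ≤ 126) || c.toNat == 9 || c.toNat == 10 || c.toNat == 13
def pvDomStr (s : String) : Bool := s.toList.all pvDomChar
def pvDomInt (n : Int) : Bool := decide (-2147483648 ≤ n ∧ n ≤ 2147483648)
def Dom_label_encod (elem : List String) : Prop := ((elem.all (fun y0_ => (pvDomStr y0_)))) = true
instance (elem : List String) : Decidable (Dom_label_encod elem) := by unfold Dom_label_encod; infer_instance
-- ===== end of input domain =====

-- B replaces A's per-unique-value rescan of elem with one counting pass plus range(count) emission (faster).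

-- ===== PORT A =====
def label_encod (elem : List String) : List String :=
  -- unique_series = list(Counter(elem).keys())
  let unique_series := (PySem.Dict.counter elem).keys
  -- unique_series = [str(i) for i in unique_series]  (str is the identity on strings)
  let unique_series := unique_series.map (fun i => i)
  -- for unique_serie in unique_series: filter, enumerate-transform, append each
  unique_series.foldl (fun encoded_list unique_serie =>
    let duplicate_series := elem.filter (fun i => i == unique_serie)
    let duplicate_series_transformed :=
      (PySem.List.enumerate duplicate_series 0).map
        (fun ji => ji.2 ++ "__" ++ PySem.Int.toStr ji.1)
    duplicate_series_transformed.foldl (fun acc i => acc ++ [i]) encoded_list) []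

-- ===== PORT B =====
def label_encod_alt (elem : List String) : List String :=
  -- counts = {}; for x in elem: counts[x] = counts.get(x, 0) + 1
  let counts : PySem.Dict String Int :=
    elem.foldl (fun d x => d.insert x (d.getD x 0 + 1)) PySem.Dict.empty
  -- [str(v) + '__' + str(j) for v in counts for j in range(counts[v])]
  counts.keys.flatMap (fun v =>
    (PySem.List.pyRange 0 (counts.getD v 0) 1).map (fun j => v ++ "__" ++ PySem.Int.toStr j))

-- ===== PRECONDITION & SPEC =====
def Spec_label_encod (elem : List String) (out : List String) : Prop := out = label_encod_alt elem
instance (elem : List String) (out : List String) : Decidable (Spec_label_encod elem out) := by unfold Spec_label_encod; infer_instance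

-- ===== CLAIM (what is proved, stated in full; the proofs are below) =====
def Claim_equal_label_encod : Prop := ∀ (elem : List String), Dom_label_encod elem → Spec_label_encod elem (label_encod elem)

-- ===== LEMMAS AND PROOFS =====

-- elem.filter (· == v) is count-many copies of v
lemma filter_beq_eq_replicate (elem : List String) (v : String) :
    elem.filter (fun i => i == v) = List.replicate (elem.count v) v := by
  induction elem with
  | nil => simp
  | cons x xs ih =>
    by_cases h : x = v
    · subst h; simp [ih, List.replicate_succ]
    · simp [h, ih]

-- A's enumerate-over-the-filtered-group equals B's range(count) emission
lemma group_eq (elem : List String) (v : String) :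
    (PySem.List.enumerate (elem.filter (fun i => i == v)) 0).map
        (fun ji => ji.2 ++ "__" ++ PySem.Int.toStr ji.1)
      = (PySem.List.pyRange 0 ((elem.count v : Int)) 1).map
          (fun j => v ++ "__" ++ PySem.Int.toStr j) := by
  rw [filter_beq_eq_replicate]
  generalize elem.count v = n
  rw [PySem.List.enumerate_eq_map_pyRange (d := "")]
  rw [List.map_map]
  simp only [PySem.List.len_eq, List.length_replicate]
  apply List.map_congr_left
  intro j hj
  rw [PySem.List.mem_pyRange_one] at hj
  have h1 : PySem.List.pyGetD (List.replicate n v) j "" = v := by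
    rw [PySem.List.pyGetD_eq_getElem (h0 := hj.1) (h1 := by simpa using hj.2)]
    simp
  simp [h1]

-- ===== VERDICT (by name: the statement is the Claim_ definition above) =====
theorem label_encod_spec : Claim_equal_label_encod := by
  intro elem _
  unfold Spec_label_encod label_encod label_encod_alt
  rw [PySem.Dict.foldl_insert_getD_add_one_eq_counter]
  simp only [List.map_id_fun', id]
  rw [PySem.List.foldl_congr_mem (g := fun acc v =>
        acc ++ ((PySem.List.pyRange 0 (((PySem.Dict.counter elem).getD v 0)) 1).map
          (fun j => v ++ "__" ++ PySem.Int.toStr j)))]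
  · exact PySem.List.foldl_append_eq_flatMap _ _ _
  · intro acc v hv
    rw [PySem.List.foldl_append_singleton_eq_self, PySem.Dict.getD_counter, group_eq]
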